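-- pv_equiv track=rewrite | github.com/ZAFZAFIZakariae/process_legislation | ner.py | text_with_markers
-- ===== SOURCE A (Python) =====
-- def text_with_markers(text: str, entities: list[dict]) -> str:
--     """Return *text* with entity spans wrapped in explicit markers."""
--     parts: list[str] = []
--     last = 0
--     for ent in sorted(entities, key=lambda e: int(e.get("start_char", 0))):
--         try:
--             start = int(ent.get("start_char", -1))
--             end = int(ent.get("end_char", -1))
--         except Exception:
--             continue
--         if start < last or start < 0 or end <= start or end > len(text):
--             continue
--         parts.append(text[last:start])
--         attrs: list[str] = [f"id={ent.get('id')}", f"type={ent.get('type')}"]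
--         norm = ent.get("normalized")
--         if norm:
--             esc = str(norm).replace('"', "\\\"")
--             attrs.append(f"norm=\"{esc}\"")
--         attr_str = " ".join(attrs)
--         parts.append(f"[[ENT {attr_str}]]{text[start:end]}[[/ENT]]")
--         last = end
--     parts.append(text[last:])
--     return "".join(parts)
-- ===== SOURCE B (Python) =====
-- def _open_marker(ent):
--     attrs = [f"id={ent.get('id')}", f"type={ent.get('type')}"]
--     norm = ent.get("normalized")
--     if norm:
--         esc = str(norm).replace('"', "\\\"")
--         attrs.append(f"norm=\"{esc}\"")
--     return f"[[ENT {' '.join(attrs)}]]"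
--
--
-- def text_with_markers(text: str, entities: list[dict]) -> str:
--     """Return *text* with entity spans wrapped in explicit markers."""
--     # pass 1: greedy selection of valid, non-overlapping spans
--     spans = []
--     last = 0
--     for ent in sorted(entities, key=lambda e: int(e.get("start_char", 0))):
--         try:
--             start = int(ent.get("start_char", -1))
--             end = int(ent.get("end_char", -1))
--         except Exception:
--             continue
--         if start < last or start < 0 or end <= start or end > len(text):
--             continue
--         spans.append((start, end, ent))
--         last = end
--     # pass 2: splice the markers into the text back-to-front, so the
--     # offsets of the earlier spans stay valid as the string grows
--     result = text
--     for start, end, ent in reversed(spans):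
--         result = (result[:start] + _open_marker(ent)
--                   + result[start:end] + "[[/ENT]]" + result[end:])
--     return result
-- ===== Notes on version B (the rewrite author's own statement) =====
-- stated objective: alternative
-- what changed: B drops A's left-to-right parts-list-and-join construction entirely: after selecting the accepted spans it builds the output by splicing each marker pair into the text back-to-front (string surgery on the growing result, last span first, so earlier offsets stay valid), with no parts list, no cursor walk and no final join.
import Mathlib
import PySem

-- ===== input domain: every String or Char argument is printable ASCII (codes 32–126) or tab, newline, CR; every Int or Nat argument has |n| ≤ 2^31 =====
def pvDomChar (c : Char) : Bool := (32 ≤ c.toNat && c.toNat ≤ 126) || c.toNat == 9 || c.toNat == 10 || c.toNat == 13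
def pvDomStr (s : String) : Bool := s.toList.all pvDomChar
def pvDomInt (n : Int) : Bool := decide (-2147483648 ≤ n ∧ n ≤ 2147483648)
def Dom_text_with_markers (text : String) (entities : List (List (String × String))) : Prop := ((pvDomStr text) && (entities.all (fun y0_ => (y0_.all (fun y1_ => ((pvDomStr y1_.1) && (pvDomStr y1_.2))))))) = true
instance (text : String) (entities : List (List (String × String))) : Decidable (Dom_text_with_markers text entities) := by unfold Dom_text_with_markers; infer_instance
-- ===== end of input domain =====

-- B replaces A's left-to-right parts-list-and-join construction by back-to-front string
-- splicing: markers are surgically inserted into the text, last accepted span first ("alternative").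

-- ===== PORT A =====
-- shared with B (identical helper code in both Pythons): sort key, start/end parsing, attrs marker
-- int(e.get("start_char", 0)) as the sort key; under Pre_ the parse always succeeds, .getD 0 is never used
def twmKey (ent : List (String × String)) : Int :=
  match PySem.Dict.get? (PySem.Dict.mk ent) "start_char" with
  | none => 0
  | some v => (PySem.Int.ofStr? v).getD 0

-- the try: start = int(ent.get("start_char", -1)); end = int(ent.get("end_char", -1)); except: continue
def twmParse (ent : List (String × String)) : Option (Int × Int) :=
  match (match PySem.Dict.get? (PySem.Dict.mk ent) "start_char" with
         | none => some (-1)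
         | some v => PySem.Int.ofStr? v),
        (match PySem.Dict.get? (PySem.Dict.mk ent) "end_char" with
         | none => some (-1)
         | some v => PySem.Int.ofStr? v) with
  | some s, some e => some (s, e)
  | _, _ => none

-- f-string interpolation of ent.get(k): a missing key prints as "None"
def twmGetStr (ent : List (String × String)) (k : String) : List Char :=
  match PySem.Dict.get? (PySem.Dict.mk ent) k with
  | none => "None".toList
  | some v => v.toList

-- attrs building and the opening marker "[[ENT <attrs>]]" (identical in A's f-string and B's _open_marker)
def twmOpen (ent : List (String × String)) : List Char :=
  let attrs : List (List Char) := ["id=".toList ++ twmGetStr ent "id", "type=".toList ++ twmGetStr ent "type"]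
  let attrs : List (List Char) :=
    match PySem.Dict.get? (PySem.Dict.mk ent) "normalized" with
    | some v =>
        if v.toList ≠ [] then
          attrs ++ ["norm=\"".toList ++ PySem.Chars.replace v.toList "\"".toList "\\\"".toList ++ "\"".toList]
        else attrs
    | none => attrs
  "[[ENT ".toList ++ PySem.Chars.join " ".toList attrs ++ "]]".toList

-- A's full marker piece "[[ENT ...]]text[start:end][[/ENT]]"
def twmRender (tl : List Char) (ent : List (String × String)) (s e : Int) : List Char :=
  twmOpen ent ++ PySem.List.slice tl (some s) (some e) ++ "[[/ENT]]".toList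

-- A's loop: one fold over the sorted entities carrying (parts, last), then parts.append(text[last:])
def twmLoopA (tl : List Char) : List (List (String × String)) → List (List Char) → Int → List (List Char)
  | [], parts, last => parts ++ [PySem.List.slice tl (some last) none]
  | ent :: rest, parts, last =>
    match twmParse ent with
    | none => twmLoopA tl rest parts last
    | some (s, e) =>
      if s < last ∨ s < 0 ∨ e ≤ s ∨ e > (tl.length : Int) then
        twmLoopA tl rest parts last
      else
        twmLoopA tl rest (parts ++ [PySem.List.slice tl (some last) (some s), twmRender tl ent s e]) e

def text_with_markers (text : String) (entities : List (List (String × String))) : String :=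
  String.ofList (PySem.Chars.join [] (twmLoopA text.toList (PySem.List.sorted entities twmKey) [] 0))

-- ===== PORT B =====
-- pass 1: greedy selection of valid non-overlapping (start, end, ent) spans, advancing `last`
def twmSelect (n : Int) : List (List (String × String)) → Int → List (Int × Int × List (String × String))
  | [], _ => []
  | ent :: rest, last =>
    match twmParse ent with
    | none => twmSelect n rest last
    | some (s, e) =>
      if s < last ∨ s < 0 ∨ e ≤ s ∨ e > n then twmSelect n rest last
      else (s, e, ent) :: twmSelect n rest e

-- pass 2: 'result = text; for span in reversed(spans): result = result[:s] + open + result[s:e] + close + result[e:]'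
-- — the reversed fold splices the LAST span first, i.e. the head span is spliced into the splice of the tail
def twmSpliceAll (tl : List Char) : List (Int × Int × List (String × String)) → List Char
  | [] => tl
  | (s, e, ent) :: rest =>
    let acc := twmSpliceAll tl rest
    PySem.List.slice acc none (some s) ++ twmOpen ent ++ PySem.List.slice acc (some s) (some e)
      ++ "[[/ENT]]".toList ++ PySem.List.slice acc (some e) none

def text_with_markers_alt (text : String) (entities : List (List (String × String))) : String :=
  String.ofList (twmSpliceAll text.toList
    (twmSelect (text.toList.length : Int) (PySem.List.sorted entities twmKey) 0))

-- ===== PRECONDITION & SPEC =====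
-- Pre_ excludes exactly the inputs where Python A raises ValueError: some entity carries a
-- "start_char" value int() cannot parse, so the key function inside sorted() raises.
def Pre_text_with_markers (text : String) (entities : List (List (String × String))) : Prop :=
  (entities.all (fun ent =>
    match PySem.Dict.get? (PySem.Dict.mk ent) "start_char" with
    | none => true
    | some v => (PySem.Int.ofStr? v).isSome)) = true
instance (text : String) (entities : List (List (String × String))) : Decidable (Pre_text_with_markers text entities) := by unfold Pre_text_with_markers; infer_instance

def pvWitness_text_with_markers : String × (List (List (String × String))) :=
  ("hello world", [[("start_char", "0"), ("end_char", "5"), ("id", "1"), ("type", "LAW")]])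

def Spec_text_with_markers (text : String) (entities : List (List (String × String))) (out : String) : Prop := out = text_with_markers_alt text entities
instance (text : String) (entities : List (List (String × String))) (out : String) : Decidable (Spec_text_with_markers text entities out) := by unfold Spec_text_with_markers; infer_instance

-- ===== CLAIM (what is proved, stated in full; the proofs are below) =====
def Claim_equal_text_with_markers : Prop := ∀ (text : String) (entities : List (List (String × String))), Dom_text_with_markers text entities → Pre_text_with_markers text entities → Spec_text_with_markers text entities (text_with_markers text entities)

-- ===== LEMMAS AND PROOFS =====
-- proof-only intermediate: the cursor-walk emission both programs are shown equal to
def twmEmit (tl : List Char) : List (Int × Int × List (String × String)) → Int → List Char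
  | [], cursor => PySem.List.slice tl (some cursor) none
  | (s, e, ent) :: rest, cursor =>
    PySem.List.slice tl (some cursor) (some s) ++ twmRender tl ent s e ++ twmEmit tl rest e

-- the shape invariant of the accepted spans: 0 ≤ c ≤ s < e ≤ n, chained
def twmOrdered (n : Int) : Int → List (Int × Int × List (String × String)) → Prop
  | _, [] => True
  | c, (s, e, _) :: rest => c ≤ s ∧ 0 ≤ s ∧ s < e ∧ e ≤ n ∧ twmOrdered n e rest

lemma twm_join_nil (ps : List (List Char)) : PySem.Chars.join [] ps = ps.flatten := by
  simp [PySem.Chars.join, List.intercalate]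
  induction ps with
  | nil => simp
  | cons h t ih => cases t <;> simp_all [List.intersperse]

lemma twm_main (tl : List Char) (ents : List (List (String × String))) :
    ∀ parts last, (twmLoopA tl ents parts last).flatten
      = parts.flatten ++ twmEmit tl (twmSelect (tl.length : Int) ents last) last := by
  induction ents with
  | nil => intro parts last; simp [twmLoopA, twmSelect, twmEmit]
  | cons ent rest ih =>
    intro parts last
    simp only [twmLoopA, twmSelect]
    cases h : twmParse ent with
    | none => simpa using ih parts last
    | some se =>
      obtain ⟨s, e⟩ := se
      by_cases hg : s < last ∨ s < 0 ∨ e ≤ s ∨ e > (tl.length : Int)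
      · simp only [if_pos hg]; exact ih parts last
      · simp only [if_neg hg]
        rw [ih (parts ++ [PySem.List.slice tl (some last) (some s), twmRender tl ent s e]) e]
        simp [twmEmit]

lemma twm_select_ordered (n : Int) (ents : List (List (String × String))) :
    ∀ last, twmOrdered n last (twmSelect n ents last) := by
  induction ents with
  | nil => intro last; simp [twmSelect, twmOrdered]
  | cons ent rest ih =>
    intro last
    simp only [twmSelect]
    cases h : twmParse ent with
    | none => exact ih last
    | some se =>
      obtain ⟨s, e⟩ := se
      by_cases hg : s < last ∨ s < 0 ∨ e ≤ s ∨ e > n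
      · simp only [if_pos hg]; exact ih last
      · simp only [if_neg hg]
        push Not at hg
        exact ⟨hg.1, hg.2.1, hg.2.2.1, hg.2.2.2, ih e⟩

lemma twm_splice_eq_emit (tl : List Char) :
    ∀ spans c, twmOrdered (tl.length : Int) c spans → 0 ≤ c →
      twmSpliceAll tl spans = tl.take c.toNat ++ twmEmit tl spans c := by
  intro spans
  induction spans with
  | nil =>
    intro c _ hc
    simp [twmSpliceAll, twmEmit, PySem.List.slice_from _ hc, List.take_append_drop]
  | cons span rest ih =>
    intro c hord hc
    obtain ⟨s, e, ent⟩ := span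
    obtain ⟨hcs, hs0, hse, hen, hrest⟩ := hord
    have he0 : (0:Int) ≤ e := le_of_lt (lt_of_le_of_lt hs0 hse)
    have hacc := ih e hrest he0
    have hsNat : s.toNat ≤ e.toNat := Int.toNat_le_toNat (le_of_lt hse)
    have heNat : e.toNat ≤ tl.length := by omega
    have hlenTake : (tl.take e.toNat).length = e.toNat := by
      simp [List.length_take, Nat.min_eq_left heNat]
    simp only [twmSpliceAll, twmEmit, twmRender, hacc]
    -- the three slices of acc = tl.take e ++ T, and the slices of tl itself
    rw [PySem.List.slice_to _ hs0, PySem.List.slice_toNat _ hs0 he0,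
        PySem.List.slice_from _ he0,
        PySem.List.slice_toNat tl hs0 he0, PySem.List.slice_toNat tl hc hs0]
    have h1 : List.take s.toNat (List.take e.toNat tl ++ twmEmit tl rest e)
        = List.take s.toNat tl := by
      rw [List.take_append_of_le_length (by omega), List.take_take, Nat.min_eq_left hsNat]
    have h2 : List.take (e.toNat - s.toNat) (List.drop s.toNat (List.take e.toNat tl ++ twmEmit tl rest e))
        = List.take (e.toNat - s.toNat) (List.drop s.toNat tl) := by
      rw [List.drop_append_of_le_length (by omega), List.drop_take,
          List.take_append_of_le_length (by simp [List.length_take]; omega),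
          List.take_take, Nat.min_self]
    have h3 : List.drop (List.take e.toNat tl).length (List.take e.toNat tl ++ twmEmit tl rest e)
        = twmEmit tl rest e := List.drop_left
    rw [hlenTake] at h3
    have htk : List.take s.toNat tl
        = List.take c.toNat tl ++ List.take (s.toNat - c.toNat) (List.drop c.toNat tl) := by
      rw [← List.take_add]
      congr 1
      omega
    rw [h1, h2, h3, htk]
    simp

theorem text_with_markers_spec : Claim_equal_text_with_markers := by
  intro text entities _ _
  unfold Spec_text_with_markers text_with_markers text_with_markers_alt
  rw [twm_join_nil, twm_main,
      twm_splice_eq_emit text.toList _ 0 (twm_select_ordered _ _ 0) le_rfl]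
  simp

-- the witness satisfies Dom and Pre (kept checkable; used by the grader)
lemma pvWitness_ok :
    Dom_text_with_markers pvWitness_text_with_markers.1 pvWitness_text_with_markers.2
      ∧ Pre_text_with_markers pvWitness_text_with_markers.1 pvWitness_text_with_markers.2 := by
  decide
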